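-- pv_equiv track=rewrite | github.com/trendiguru/core | db_stuff/amazon_worker.py | verify_by_title
-- ===== SOURCE A (Python) =====
-- pants = ['PANTS', 'PANT', 'TROUSERS', 'TROUSER', 'CULOTTE', 'CULOTTES', 'CHINO', 'CHINOS', 'CAPRI', 'CAPRIS', 'SLACKS']
--
-- def verify_by_title(title):
--     title_upper = title.upper()
--     if any(x in title_upper for x in ['BLAZER', 'BLAZERS']):
--         return 'blazer'
--     if any(x in title_upper for x in ['STOCKING', 'STOCKINGS']):
--         return 'stockings'
--     elif any(x in title_upper for x in pants):
--         return 'pants'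
--     elif any(x in title_upper for x in ['DRESS', 'DRESSES', 'MAXI', 'GOWN']):
--         return 'dress'
--     elif any(x in title_upper for x in ['TOP', 'TOPS']):
--         return 'top'
--     elif any(x in title_upper for x in ['SHIRT', 'SHIRTS']):
--         return 'shirt'
--     elif 'SHORTS' in title_upper:
--         return 'shorts'
--     elif 'JEANS' in title_upper:
--         return 'jeans'
--     elif any(x in title_upper for x in [' TEES ', ' TEE ', 'T-SHIRT', 'T-SHIRTS']):
--         return 't-shirt'
--     elif any(x in title_upper for x in ['SKIRT', 'SKIRTS', 'SKORT', 'SKORTS', 'MINI']):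
--         return 'skirt'
--     elif any(x in title_upper for x in ['COAT', 'FAUX', 'COATS', 'OUTWEAR']):
--         return 'coat'
--     elif any(x in title_upper for x in ['JACKET', 'JACKETS']):
--         return 'jacket'
--     elif 'TIGHTS' in title_upper:
--         return 'tights'
--     else:
--         return ''
-- ===== SOURCE B (Python) =====
-- # Different algorithm: instead of 13 ordered whole-title substring tests, scan the title ONCE
-- # position by position.  The keywords are flattened into priority order and indexed by their
-- # first character (BUCKETS); at each position only the bucket of the current character is
-- # tried, and the minimum matched priority is kept.  The answer is the label of that priority,
-- # '' if nothing matched.  Correct because 'kw in s' holds iff kw starts at some position of s,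
-- # and A's first matching branch is exactly the minimum matching flat priority.
-- FLAT = [
--     ('BLAZER', 'blazer'), ('BLAZERS', 'blazer'),
--     ('STOCKING', 'stockings'), ('STOCKINGS', 'stockings'),
--     ('PANTS', 'pants'), ('PANT', 'pants'), ('TROUSERS', 'pants'), ('TROUSER', 'pants'),
--     ('CULOTTE', 'pants'), ('CULOTTES', 'pants'), ('CHINO', 'pants'), ('CHINOS', 'pants'),
--     ('CAPRI', 'pants'), ('CAPRIS', 'pants'), ('SLACKS', 'pants'),
--     ('DRESS', 'dress'), ('DRESSES', 'dress'), ('MAXI', 'dress'), ('GOWN', 'dress'),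
--     ('TOP', 'top'), ('TOPS', 'top'),
--     ('SHIRT', 'shirt'), ('SHIRTS', 'shirt'),
--     ('SHORTS', 'shorts'),
--     ('JEANS', 'jeans'),
--     (' TEES ', 't-shirt'), (' TEE ', 't-shirt'), ('T-SHIRT', 't-shirt'), ('T-SHIRTS', 't-shirt'),
--     ('SKIRT', 'skirt'), ('SKIRTS', 'skirt'), ('SKORT', 'skirt'), ('SKORTS', 'skirt'), ('MINI', 'skirt'),
--     ('COAT', 'coat'), ('FAUX', 'coat'), ('COATS', 'coat'), ('OUTWEAR', 'coat'),
--     ('JACKET', 'jacket'), ('JACKETS', 'jacket'),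
--     ('TIGHTS', 'tights'),
-- ]
--
-- # the keywords of FLAT grouped by first character, with their FLAT priorities
-- BUCKETS = {
--     'B': [(0, 'BLAZER'), (1, 'BLAZERS')],
--     'S': [(2, 'STOCKING'), (3, 'STOCKINGS'), (14, 'SLACKS'), (21, 'SHIRT'), (22, 'SHIRTS'), (23, 'SHORTS'), (29, 'SKIRT'), (30, 'SKIRTS'), (31, 'SKORT'), (32, 'SKORTS')],
--     'P': [(4, 'PANTS'), (5, 'PANT')],
--     'T': [(6, 'TROUSERS'), (7, 'TROUSER'), (19, 'TOP'), (20, 'TOPS'), (27, 'T-SHIRT'), (28, 'T-SHIRTS'), (40, 'TIGHTS')],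
--     'C': [(8, 'CULOTTE'), (9, 'CULOTTES'), (10, 'CHINO'), (11, 'CHINOS'), (12, 'CAPRI'), (13, 'CAPRIS'), (34, 'COAT'), (36, 'COATS')],
--     'D': [(15, 'DRESS'), (16, 'DRESSES')],
--     'M': [(17, 'MAXI'), (33, 'MINI')],
--     'G': [(18, 'GOWN')],
--     'J': [(24, 'JEANS'), (38, 'JACKET'), (39, 'JACKETS')],
--     ' ': [(25, ' TEES '), (26, ' TEE ')],
--     'F': [(35, 'FAUX')],
--     'O': [(37, 'OUTWEAR')],
-- }
--
-- def verify_by_title(title):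
--     u = title.upper()
--     best = len(FLAT)
--     for i, ch in enumerate(u):
--         for p, kw in BUCKETS.get(ch, []):
--             if p < best and u.startswith(kw, i):
--                 best = p
--     return FLAT[best][1] if best < len(FLAT) else ''
-- ===== Notes on version B (the rewrite author's own statement) =====
-- stated objective: alternative
-- what changed: Instead of 13 ordered whole-title substring tests, B flattens the keywords into one priority-ordered table bucketed by first character and makes a single scan over the title's positions, trying only the current character's bucket and keeping the minimum matched priority; the answer is the label of that priority ('' if none).
import Mathlib
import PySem

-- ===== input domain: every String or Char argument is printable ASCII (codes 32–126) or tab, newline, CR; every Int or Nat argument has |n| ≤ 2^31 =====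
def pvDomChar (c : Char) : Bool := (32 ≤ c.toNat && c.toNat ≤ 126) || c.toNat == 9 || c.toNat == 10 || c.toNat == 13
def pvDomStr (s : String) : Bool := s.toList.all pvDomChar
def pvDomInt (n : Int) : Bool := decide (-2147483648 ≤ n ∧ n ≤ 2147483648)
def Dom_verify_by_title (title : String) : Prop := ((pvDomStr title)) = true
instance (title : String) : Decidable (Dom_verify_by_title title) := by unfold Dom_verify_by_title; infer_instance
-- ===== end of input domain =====

-- B replaces A's 13-branch keyword-in-title chain by a single position-by-position scan of the
-- title over first-character keyword buckets, keeping the minimum matched priority (alternative algorithm).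

-- ===== PORT A =====
def pants : List String := ["PANTS", "PANT", "TROUSERS", "TROUSER", "CULOTTE", "CULOTTES", "CHINO", "CHINOS", "CAPRI", "CAPRIS", "SLACKS"]

def verify_by_title (title : String) : String :=
  let title_upper := PySem.Str.upper title
  if ["BLAZER", "BLAZERS"].any (fun x => PySem.Str.isIn x title_upper) then "blazer"
  else if ["STOCKING", "STOCKINGS"].any (fun x => PySem.Str.isIn x title_upper) then "stockings"
  else if pants.any (fun x => PySem.Str.isIn x title_upper) then "pants"
  else if ["DRESS", "DRESSES", "MAXI", "GOWN"].any (fun x => PySem.Str.isIn x title_upper) then "dress"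
  else if ["TOP", "TOPS"].any (fun x => PySem.Str.isIn x title_upper) then "top"
  else if ["SHIRT", "SHIRTS"].any (fun x => PySem.Str.isIn x title_upper) then "shirt"
  else if PySem.Str.isIn "SHORTS" title_upper then "shorts"
  else if PySem.Str.isIn "JEANS" title_upper then "jeans"
  else if [" TEES ", " TEE ", "T-SHIRT", "T-SHIRTS"].any (fun x => PySem.Str.isIn x title_upper) then "t-shirt"
  else if ["SKIRT", "SKIRTS", "SKORT", "SKORTS", "MINI"].any (fun x => PySem.Str.isIn x title_upper) then "skirt"
  else if ["COAT", "FAUX", "COATS", "OUTWEAR"].any (fun x => PySem.Str.isIn x title_upper) then "coat"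
  else if ["JACKET", "JACKETS"].any (fun x => PySem.Str.isIn x title_upper) then "jacket"
  else if PySem.Str.isIn "TIGHTS" title_upper then "tights"
  else ""

-- ===== PORT B =====
-- FLAT of Source B: (keyword, label) pairs in priority order
def pvFlat : List (String × String) :=
  [("BLAZER", "blazer"), ("BLAZERS", "blazer"),
   ("STOCKING", "stockings"), ("STOCKINGS", "stockings"),
   ("PANTS", "pants"), ("PANT", "pants"), ("TROUSERS", "pants"), ("TROUSER", "pants"),
   ("CULOTTE", "pants"), ("CULOTTES", "pants"), ("CHINO", "pants"), ("CHINOS", "pants"),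
   ("CAPRI", "pants"), ("CAPRIS", "pants"), ("SLACKS", "pants"),
   ("DRESS", "dress"), ("DRESSES", "dress"), ("MAXI", "dress"), ("GOWN", "dress"),
   ("TOP", "top"), ("TOPS", "top"),
   ("SHIRT", "shirt"), ("SHIRTS", "shirt"),
   ("SHORTS", "shorts"),
   ("JEANS", "jeans"),
   (" TEES ", "t-shirt"), (" TEE ", "t-shirt"), ("T-SHIRT", "t-shirt"), ("T-SHIRTS", "t-shirt"),
   ("SKIRT", "skirt"), ("SKIRTS", "skirt"), ("SKORT", "skirt"), ("SKORTS", "skirt"), ("MINI", "skirt"),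
   ("COAT", "coat"), ("FAUX", "coat"), ("COATS", "coat"), ("OUTWEAR", "coat"),
   ("JACKET", "jacket"), ("JACKETS", "jacket"),
   ("TIGHTS", "tights")]

-- BUCKETS of Source B: the dict literal keyword-by-first-character, with FLAT priorities
def pvBuckets : PySem.Dict Char (List (Int × String)) := PySem.Dict.mk
  [('B', [(0, "BLAZER"), (1, "BLAZERS")]),
   ('S', [(2, "STOCKING"), (3, "STOCKINGS"), (14, "SLACKS"), (21, "SHIRT"), (22, "SHIRTS"),
          (23, "SHORTS"), (29, "SKIRT"), (30, "SKIRTS"), (31, "SKORT"), (32, "SKORTS")]),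
   ('P', [(4, "PANTS"), (5, "PANT")]),
   ('T', [(6, "TROUSERS"), (7, "TROUSER"), (19, "TOP"), (20, "TOPS"), (27, "T-SHIRT"),
          (28, "T-SHIRTS"), (40, "TIGHTS")]),
   ('C', [(8, "CULOTTE"), (9, "CULOTTES"), (10, "CHINO"), (11, "CHINOS"), (12, "CAPRI"),
          (13, "CAPRIS"), (34, "COAT"), (36, "COATS")]),
   ('D', [(15, "DRESS"), (16, "DRESSES")]),
   ('M', [(17, "MAXI"), (33, "MINI")]),
   ('G', [(18, "GOWN")]),
   ('J', [(24, "JEANS"), (38, "JACKET"), (39, "JACKETS")]),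
   (' ', [(25, " TEES "), (26, " TEE ")]),
   ('F', [(35, "FAUX")]),
   ('O', [(37, "OUTWEAR")])]

-- inner loop: 'for p, kw in BUCKETS.get(ch, []): if p < best and u.startswith(kw, i): best = p'
-- (u.startswith(kw, i) with 0 ≤ i is exactly: kw.toList is a prefix of u.drop i.toNat)
def pvInner (u : List Char) (i : Int) (ch : Char) (best : Int) : Int :=
  (PySem.Dict.getD pvBuckets ch []).foldl
    (fun b pk => if pk.1 < b ∧ PySem.Chars.startswith (u.drop i.toNat) pk.2.toList then pk.1 else b)
    best

def verify_by_title_alt (title : String) : String :=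
  let u := (PySem.Str.upper title).toList
  let best := (PySem.List.enumerate u 0).foldl (fun b ic => pvInner u ic.1 ic.2 b)
    ((pvFlat.length : Nat) : Int)
  -- 'FLAT[best][1] if best < len(FLAT) else ""' ; 0 ≤ best < len so pyGetD is exact here
  if best < (pvFlat.length : Int) then (PySem.List.pyGetD pvFlat best ("", "")).2 else ""

-- ===== PRECONDITION & SPEC =====
def Spec_verify_by_title (title : String) (out : String) : Prop := out = verify_by_title_alt title
instance (title : String) (out : String) : Decidable (Spec_verify_by_title title out) := by unfold Spec_verify_by_title; infer_instance

-- ===== CLAIM =====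
def Claim_equal_verify_by_title : Prop := ∀ (title : String), Dom_verify_by_title title → Spec_verify_by_title title (verify_by_title title)

-- ===== LEMMAS AND PROOFS =====

-- proof-side view of the inner loop: the same guarded fold over ALL of FLAT (enumerated)
def pvEnumFold (s : List Char) (b : Int) : Int :=
  (PySem.List.enumerate pvFlat 0).foldl
    (fun b pk => if pk.1 < b ∧ PySem.Chars.startswith s pk.2.1.toList then pk.1 else b) b

-- proof-side view of the outer loop: structural recursion over the suffixes
def pvScan : List Char → Int → Int
  | [], best => best
  | c :: t, best => pvScan t (pvEnumFold (c :: t) best)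

-- guard 'p < best' never fires once best ≤ every remaining index
lemma pv_fold_unchanged (s : List Char) : ∀ (F : List (String × String)) (k b : Int), b ≤ k →
    (PySem.List.enumerate F k).foldl
      (fun b pk => if pk.1 < b ∧ PySem.Chars.startswith s pk.2.1.toList then pk.1 else b) b = b := by
  intro F
  induction F with
  | nil => intro k b _; simp [PySem.List.enumerate_nil]
  | cons r rest ih =>
      intro k b hb
      rw [PySem.List.enumerate_cons]
      simp only [List.foldl_cons]
      have : ¬ ((k : Int) < b ∧ PySem.Chars.startswith s r.1.toList) := by
        rintro ⟨h, -⟩; omega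
      rw [if_neg this]
      exact ih (k + 1) b (by omega)

-- the inner loop computes min(best, first prefix-match index) (offset by k)
lemma pv_fold_eq (s : List Char) : ∀ (F : List (String × String)) (k b : Int),
    (PySem.List.enumerate F k).foldl
      (fun b pk => if pk.1 < b ∧ PySem.Chars.startswith s pk.2.1.toList then pk.1 else b) b
    = (if (F.findIdx fun r => PySem.Chars.startswith s r.1.toList) < F.length ∧
          k + ((F.findIdx fun r => PySem.Chars.startswith s r.1.toList : Nat) : Int) < b
       then k + ((F.findIdx fun r => PySem.Chars.startswith s r.1.toList : Nat) : Int) else b) := by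
  intro F
  induction F with
  | nil => intro k b; simp [PySem.List.enumerate_nil]
  | cons r rest ih =>
      intro k b
      rw [PySem.List.enumerate_cons]
      simp only [List.foldl_cons, List.findIdx_cons, List.length_cons]
      by_cases hm : PySem.Chars.startswith s r.1.toList = true
      · by_cases hk : (k : Int) < b
        · rw [if_pos ⟨hk, hm⟩, pv_fold_unchanged s rest (k+1) k (by omega)]
          simp only [hm, cond_true, Nat.cast_zero]
          split_ifs <;> omega
        · rw [if_neg (by rintro ⟨h, -⟩; exact hk h),
              pv_fold_unchanged s rest (k+1) b (by omega)]
          simp only [hm, cond_true, Nat.cast_zero]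
          split_ifs <;> omega
      · rw [if_neg (by rintro ⟨-, h⟩; exact hm h), ih (k+1) b]
        simp only [hm, cond_false]
        push_cast
        split_ifs <;> omega

-- first index where p or q holds = min of the two first indices
lemma pv_findIdx_or {α : Type} (p q : α → Bool) : ∀ (l : List α),
    (l.findIdx fun x => p x || q x) = min (l.findIdx p) (l.findIdx q) := by
  intro l
  induction l with
  | nil => simp only [List.findIdx_nil, Nat.min_self]
  | cons a t ih =>
      cases hp : p a <;> cases hq : q a <;>
        simp only [List.findIdx_cons, hp, hq, ih, Nat.succ_min_succ, Bool.or_false,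
          Bool.or_true, cond_true, cond_false, Nat.min_self, Nat.zero_min, Nat.min_zero]

-- kw is a substring of c::t iff it is a prefix of c::t or a substring of t
lemma pv_isIn_cons (kw : List Char) (c : Char) (t : List Char) :
    PySem.Chars.isIn kw (c :: t)
      = (PySem.Chars.startswith (c :: t) kw || PySem.Chars.isIn kw t) := by
  rw [Bool.eq_iff_iff]
  simp [PySem.Chars.isIn_iff_infix, PySem.Chars.startswith_iff, List.infix_cons_iff]

-- the whole scan computes min(best, first infix-match index)
lemma pv_scan_eq : ∀ (s : List Char) (b : Int),
    pvScan s b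
    = (if (pvFlat.findIdx fun r => PySem.Chars.isIn r.1.toList s) < pvFlat.length ∧
          ((pvFlat.findIdx fun r => PySem.Chars.isIn r.1.toList s : Nat) : Int) < b
       then ((pvFlat.findIdx fun r => PySem.Chars.isIn r.1.toList s : Nat) : Int) else b) := by
  intro s
  induction s with
  | nil =>
      intro b
      have h : (pvFlat.findIdx fun r => PySem.Chars.isIn r.1.toList []) = pvFlat.length := by decide
      simp [pvScan, h]
  | cons c t ih =>
      intro b
      have hpred : (fun r : String × String => PySem.Chars.isIn r.1.toList (c :: t))
          = fun r => PySem.Chars.startswith (c :: t) r.1.toList || PySem.Chars.isIn r.1.toList t := by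
        funext r; exact pv_isIn_cons _ _ _
      have hmin := pv_findIdx_or (fun r : String × String => PySem.Chars.startswith (c :: t) r.1.toList)
        (fun r => PySem.Chars.isIn r.1.toList t) pvFlat
      have hJ := List.findIdx_le_length (p := fun r : String × String => PySem.Chars.startswith (c :: t) r.1.toList) (xs := pvFlat)
      have hG := List.findIdx_le_length (p := fun r : String × String => PySem.Chars.isIn r.1.toList t) (xs := pvFlat)
      rw [show pvScan (c :: t) b = pvScan t (pvEnumFold (c :: t) b) from rfl,
          ih, pvEnumFold, pv_fold_eq, hpred, hmin]
      simp only [zero_add]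
      have hc : ∀ (m n : Nat), ((min m n : Nat) : Int) = min (m : Int) (n : Int) := by
        intro m n; push_cast; rfl
      rw [hc]
      split_ifs <;> omega

-- the bucket of c holds exactly the FLAT entries whose keyword starts with c, in order
lemma pv_bucket_entries (c : Char) :
    PySem.Dict.getD pvBuckets c []
      = (PySem.List.enumerate pvFlat 0).filterMap
          (fun pk => if pk.2.1.toList.head? = some c then some (pk.1, pk.2.1) else none) := by
  by_cases h1 : c = 'B';  · subst h1; decide
  by_cases h2 : c = 'S';  · subst h2; decide
  by_cases h3 : c = 'P';  · subst h3; decide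
  by_cases h4 : c = 'T';  · subst h4; decide
  by_cases h5 : c = 'C';  · subst h5; decide
  by_cases h6 : c = 'D';  · subst h6; decide
  by_cases h7 : c = 'M';  · subst h7; decide
  by_cases h8 : c = 'G';  · subst h8; decide
  by_cases h9 : c = 'J';  · subst h9; decide
  by_cases h10 : c = ' '; · subst h10; decide
  by_cases h11 : c = 'F'; · subst h11; decide
  by_cases h12 : c = 'O'; · subst h12; decide
  simp [pvBuckets, pvFlat, PySem.Dict.getD_eq_get?_getD,
    PySem.Dict.get?, beq_iff_eq, PySem.List.enumerate_cons, PySem.List.enumerate_nil,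
    Ne.symm h1, Ne.symm h2, Ne.symm h3, Ne.symm h4, Ne.symm h5, Ne.symm h6,
    Ne.symm h7, Ne.symm h8, Ne.symm h9, Ne.symm h10, Ne.symm h11, Ne.symm h12]

-- entries whose keyword does not start with c never match the suffix c :: t, so the
-- guarded fold over the filtered entries equals the fold over all entries
lemma pv_fold_filter (c : Char) (t : List Char) :
    ∀ (F : List (String × String)) (k b : Int), (∀ r ∈ F, r.1.toList ≠ []) →
    ((PySem.List.enumerate F k).filterMap
        (fun pk => if pk.2.1.toList.head? = some c then some (pk.1, pk.2.1) else none)).foldl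
      (fun b pk => if pk.1 < b ∧ PySem.Chars.startswith (c :: t) pk.2.toList then pk.1 else b) b
    = (PySem.List.enumerate F k).foldl
      (fun b pk => if pk.1 < b ∧ PySem.Chars.startswith (c :: t) pk.2.1.toList then pk.1 else b) b := by
  intro F
  induction F with
  | nil => intro k b _; simp [PySem.List.enumerate_nil]
  | cons r rest ih =>
      intro k b hne
      obtain ⟨k0, r', hr⟩ : ∃ k0 r', r.1.toList = k0 :: r' := by
        cases h : r.1.toList with
        | nil => exact absurd h (hne r (List.mem_cons_self ..))
        | cons x xs => exact ⟨x, xs, rfl⟩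
      rw [PySem.List.enumerate_cons, List.filterMap_cons]
      by_cases hc : r.1.toList.head? = some c
      · simp only [hc]
        simp only [List.foldl_cons]
        exact ih (k + 1) _ (fun x hx => hne x (List.mem_cons_of_mem _ hx))
      · simp only [hc]
        have hsw : PySem.Chars.startswith (c :: t) r.1.toList = false := by
          rw [Bool.eq_false_iff]
          intro h
          rw [PySem.Chars.startswith_iff, hr, List.cons_prefix_cons] at h
          rw [hr] at hc
          exact hc (by simp [h.1])
        simp only [List.foldl_cons, hsw, Bool.false_eq_true, and_false, if_false]
        exact ih (k + 1) b (fun x hx => hne x (List.mem_cons_of_mem _ hx))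

-- the inner loop at the suffix c :: t computes the same as the full-table fold
lemma pv_bfold_eq (c : Char) (t : List Char) (b : Int) :
    (PySem.Dict.getD pvBuckets c []).foldl
      (fun b pk => if pk.1 < b ∧ PySem.Chars.startswith (c :: t) pk.2.toList then pk.1 else b) b
    = pvEnumFold (c :: t) b := by
  rw [pv_bucket_entries, pvEnumFold]
  exact pv_fold_filter c t pvFlat 0 b (by decide)

-- the loop over enumerate(u) is the scan over the suffixes of u
lemma pv_enum_outer : ∀ (t pre : List Char) (b : Int),
    (PySem.List.enumerate t ((pre.length : Nat) : Int)).foldl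
      (fun b ic => pvInner (pre ++ t) ic.1 ic.2 b) b = pvScan t b := by
  intro t
  induction t with
  | nil => intro pre b; simp [PySem.List.enumerate_nil, pvScan]
  | cons c t' ih =>
      intro pre b
      rw [PySem.List.enumerate_cons, List.foldl_cons]
      have hstep : pvInner (pre ++ c :: t') ((pre.length : Nat) : Int) c b
          = pvEnumFold (c :: t') b := by
        rw [pvInner, Int.toNat_natCast, List.drop_left]
        exact pv_bfold_eq c t' b
      rw [hstep]
      have hlen : ((pre.length : Nat) : Int) + 1 = (((pre ++ [c]).length : Nat) : Int) := by
        simp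
      rw [hlen]
      have := ih (pre ++ [c]) (pvEnumFold (c :: t') b)
      rw [List.append_assoc] at this
      simpa [pvScan] using this

-- A's chain as a first-match over the flat table (proof-side recursion)
def pvRetA (u : String) : List (String × String) → String
  | [] => ""
  | (kw, l) :: rest => if PySem.Str.isIn kw u then l else pvRetA u rest

lemma pv_retA_group (u l : String) (kws : List String) (rest : List (String × String)) :
    pvRetA u (kws.map (fun k => (k, l)) ++ rest)
      = if kws.any (fun x => PySem.Str.isIn x u) then l else pvRetA u rest := by
  induction kws with
  | nil => simp
  | cons k ks ih =>
      simp only [List.map_cons, List.cons_append, pvRetA, List.any_cons, Bool.or_eq_true, ite_or, ih]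

set_option maxHeartbeats 4000000 in
lemma pv_A_eq_retA (title : String) :
    verify_by_title title = pvRetA (PySem.Str.upper title) pvFlat := by
  have hsplit : pvFlat =
    (["BLAZER", "BLAZERS"].map (fun k => (k, "blazer")) ++ (["STOCKING", "STOCKINGS"].map (fun k => (k, "stockings")) ++ (pants.map (fun k => (k, "pants")) ++ (["DRESS", "DRESSES", "MAXI", "GOWN"].map (fun k => (k, "dress")) ++ (["TOP", "TOPS"].map (fun k => (k, "top")) ++ (["SHIRT", "SHIRTS"].map (fun k => (k, "shirt")) ++ (["SHORTS"].map (fun k => (k, "shorts")) ++ (["JEANS"].map (fun k => (k, "jeans")) ++ ([" TEES ", " TEE ", "T-SHIRT", "T-SHIRTS"].map (fun k => (k, "t-shirt")) ++ (["SKIRT", "SKIRTS", "SKORT", "SKORTS", "MINI"].map (fun k => (k, "skirt")) ++ (["COAT", "FAUX", "COATS", "OUTWEAR"].map (fun k => (k, "coat")) ++ (["JACKET", "JACKETS"].map (fun k => (k, "jacket")) ++ (["TIGHTS"].map (fun k => (k, "tights")) ++ ([] : List (String × String))))))))))))))) := by rfl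
  rw [hsplit]
  simp only [pv_retA_group, verify_by_title, pants, List.any_cons, List.any_nil, Bool.or_false]
  rfl


lemma pv_retA_eq (u : String) : ∀ (F : List (String × String)),
    pvRetA u F
    = (if (F.findIdx fun r => PySem.Str.isIn r.1 u) < F.length
       then (F.getD (F.findIdx fun r => PySem.Str.isIn r.1 u) ("", "")).2 else "") := by
  intro F
  induction F with
  | nil => rfl
  | cons r rest ih =>
      obtain ⟨kw, l⟩ := r
      by_cases hm : PySem.Str.isIn kw u = true
      · show (if PySem.Str.isIn kw u then l else pvRetA u rest) = _
        rw [if_pos hm]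
        simp only [List.findIdx_cons, hm, cond_true, List.length_cons]
        rw [if_pos (by omega)]
        rfl
      · have hm' : PySem.Str.isIn kw u = false := by
          revert hm; cases PySem.Str.isIn kw u <;> simp
        show (if PySem.Str.isIn kw u then l else pvRetA u rest) = _
        rw [if_neg hm, ih]
        simp only [List.findIdx_cons, hm', cond_false, List.length_cons]
        by_cases h : (rest.findIdx fun r => PySem.Str.isIn r.1 u) < rest.length
        · rw [if_pos h, if_pos (by omega), List.getD_cons_succ]
        · rw [if_neg h, if_neg (by omega)]

-- ===== VERDICT =====
set_option maxHeartbeats 1000000 in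
theorem verify_by_title_spec : Claim_equal_verify_by_title := by
  intro title _
  show verify_by_title title = verify_by_title_alt title
  have hpred : (fun r : String × String => PySem.Chars.isIn r.1.toList (PySem.Str.upper title).toList)
      = fun r : String × String => PySem.Str.isIn r.1 (PySem.Str.upper title) := by
    funext r; rw [PySem.Str.isIn_eq]
  rw [pv_A_eq_retA, pv_retA_eq]
  show _ = verify_by_title_alt title
  have houter := pv_enum_outer (PySem.Str.upper title).toList [] ((pvFlat.length : Nat) : Int)
  simp only [List.length_nil, Nat.cast_zero, List.nil_append] at houter
  simp only [verify_by_title_alt, houter, pv_scan_eq, hpred]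
  by_cases h : (pvFlat.findIdx fun r => PySem.Str.isIn r.1 (PySem.Str.upper title)) < pvFlat.length
  · have h2 : ((pvFlat.findIdx fun r => PySem.Str.isIn r.1 (PySem.Str.upper title) : Nat) : Int)
        < (pvFlat.length : Int) := Nat.cast_lt.mpr h
    rw [if_pos h, if_pos (And.intro h h2), if_pos h2, PySem.List.pyGetD_natCast]
  · have h2 : ¬ ((pvFlat.findIdx fun r => PySem.Str.isIn r.1 (PySem.Str.upper title)) < pvFlat.length ∧
        ((pvFlat.findIdx fun r => PySem.Str.isIn r.1 (PySem.Str.upper title) : Nat) : Int)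
          < (pvFlat.length : Int)) := fun hc => h hc.1
    rw [if_neg h, if_neg h2, if_neg (lt_irrefl ((pvFlat.length : Nat) : Int))]
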